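-- pv_equiv track=rewrite | github.com/aannhvo/CS61A | study.py | unique_largest
-- ===== SOURCE A (Python) =====
-- def unique_largest(n):
--     assert n > 0
--     top = 0
--     while n:
--         n, d = n // 10, n % 10
--         if d > top:
--             top, unique = d, True
--         elif d == top:
--             unique = False
--     return unique
-- ===== SOURCE B (Python) =====
-- def unique_largest(n):
--     assert n > 0
--     s = str(n)
--     m = max(s)
--     return s.count(m) == 1
-- ===== Notes on version B (the rewrite author's own statement) =====
-- stated objective: simpler
-- what changed: B converts n to its decimal string and does two independent scans (max character, then count of that character) instead of A's single arithmetic div/mod loop maintaining a running maximum and a uniqueness flag.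
import Mathlib
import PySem

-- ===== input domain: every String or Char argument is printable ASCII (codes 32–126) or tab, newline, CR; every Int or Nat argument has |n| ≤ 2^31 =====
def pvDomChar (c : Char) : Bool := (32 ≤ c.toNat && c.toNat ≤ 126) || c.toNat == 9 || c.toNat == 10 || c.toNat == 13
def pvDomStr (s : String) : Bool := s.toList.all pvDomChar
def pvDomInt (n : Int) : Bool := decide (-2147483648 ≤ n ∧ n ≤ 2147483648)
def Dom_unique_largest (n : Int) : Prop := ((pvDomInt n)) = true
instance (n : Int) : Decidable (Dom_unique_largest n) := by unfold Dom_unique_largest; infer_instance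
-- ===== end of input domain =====

-- B computes str(n), its maximum character and that character's count — two scans of the
-- decimal string instead of A's arithmetic running-max/flag loop; objective: simpler.


-- ===== PORT A =====
-- the while-loop `while n: n, d = n // 10, n % 10; …`.  The guard `0 < n` (rather than
-- `n ≠ 0`) only makes the recursion total: under Pre_ (n > 0) the loop variable stays ≥ 0,
-- so the two guards coincide on every reached state.
def uniqueLargestLoop (n top : Int) (unique : Bool) : Bool :=
  if _h : 0 < n then
    let d := PySem.Int.mod n 10
    let n' := PySem.Int.floordiv n 10
    if d > top then uniqueLargestLoop n' d true
    else if d = top then uniqueLargestLoop n' top false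
    else uniqueLargestLoop n' top unique
  else unique
termination_by n.toNat
decreasing_by
  all_goals
    have h10 : (PySem.Int.floordiv n 10) = n / 10 := by simp [pysem]
    rw [h10]; omega

-- Python's `unique` starts unbound, but the first loop iteration always assigns it
-- (d > 0 sets True, d = 0 = top sets False), so the initial `false` here is never read.
def unique_largest (n : Int) : Bool :=
  uniqueLargestLoop n 0 false

-- ===== PORT B =====
-- Source B: s = str(n); m = max(s); return s.count(m) == 1.
-- Python's max('') would raise, but str(n) is never empty, so the `none` branch is unreachable.
def unique_largest_alt (n : Int) : Bool :=
  let s := (PySem.Int.toStr n).toList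
  match PySem.List.max? s (fun c => c) with
  | some m => decide (PySem.List.count s m = 1)
  | none => false

-- ===== PRECONDITION & SPEC =====
-- Pre_: A's `assert n > 0` raises AssertionError on every n ≤ 0 (and A's loop would not
-- terminate for n < 0); exactly those inputs are excluded.
def Pre_unique_largest (n : Int) : Prop := 0 < n
instance (n : Int) : Decidable (Pre_unique_largest n) := by unfold Pre_unique_largest; infer_instance
def pvWitness_unique_largest : Int := (212)

def Spec_unique_largest (n : Int) (out : Bool) : Prop := out = unique_largest_alt n
instance (n : Int) (out : Bool) : Decidable (Spec_unique_largest n out) := by unfold Spec_unique_largest; infer_instance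

-- ===== CLAIM (what is proved, stated in full; the proofs are below) =====
def Claim_equal_unique_largest : Prop := ∀ (n : Int), Dom_unique_largest n → Pre_unique_largest n → Spec_unique_largest n (unique_largest n)

-- ===== LEMMAS AND PROOFS =====

-- A's loop body over one decimal digit: running max and uniqueness flag.
def ulStep (s : Nat × Bool) (d : Nat) : Nat × Bool :=
  if d > s.1 then (d, true) else if d = s.1 then (s.1, false) else s

theorem loop_eq_foldl (m : Nat) : ∀ (top : Nat) (u : Bool),
    uniqueLargestLoop (m : Int) (top : Int) u = ((Nat.digits 10 m).foldl ulStep (top, u)).2 := by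
  induction m using Nat.strong_induction_on with
  | _ m ih =>
    intro top u
    rcases Nat.eq_zero_or_pos m with hm | hm
    · subst hm
      rw [uniqueLargestLoop]
      simp
    · rw [uniqueLargestLoop]
      have hpos : (0:Int) < (m:Int) := by exact_mod_cast hm
      rw [dif_pos hpos]
      have hmod : PySem.Int.mod (m:Int) 10 = ((m % 10 : Nat) : Int) := by simp [pysem]
      have hdiv : PySem.Int.floordiv (m:Int) 10 = ((m / 10 : Nat) : Int) := by simp [pysem]
      have hlt : m / 10 < m := Nat.div_lt_self hm (by norm_num)
      rw [Nat.digits_def' (by norm_num : 1 < 10) hm]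
      simp only [hmod, hdiv, List.foldl_cons]
      by_cases h1 : m % 10 > top
      · rw [if_pos (by exact_mod_cast h1)]
        rw [ih _ hlt]
        simp [ulStep, h1]
      · rw [if_neg (by exact_mod_cast h1)]
        by_cases h2 : m % 10 = top
        · rw [if_pos (by exact_mod_cast h2)]
          rw [ih _ hlt]
          simp [ulStep, h2]
        · rw [if_neg (by exact_mod_cast h2)]
          rw [ih _ hlt]
          simp [ulStep, h1, h2]

theorem foldl_ulStep (ds : List Nat) : ∀ (top : Nat) (u : Bool),
    ds.foldl ulStep (top, u) =
      (ds.foldl max top,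
       if ds.foldl max top > top then decide (ds.count (ds.foldl max top) = 1)
       else if top ∈ ds then false else u) := by
  induction ds with
  | nil => intro top u; simp
  | cons d t ih =>
    intro top u
    have ht := PySem.List.le_foldl_max t
    simp only [List.foldl_cons]
    by_cases h1 : d > top
    · have hmax : max top d = d := by omega
      rw [show ulStep (top, u) d = (d, true) by simp [ulStep, h1]]
      rw [ih d true]; simp only [hmax]
      have hle : d ≤ t.foldl max d := (ht d).1
      by_cases h2 : t.foldl max d > d
      · have hgt : t.foldl max d > top := by omega
        rw [if_pos h2, if_pos hgt]
        have hne : d ≠ t.foldl max d := by omega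
        simp [hne]
      · have heq : t.foldl max d = d := by omega
        rw [heq, if_neg (lt_irrefl d), if_pos h1]
        by_cases hd : d ∈ t
        · have hc : 1 ≤ t.count d := List.count_pos_iff.mpr hd
          simp [hd]
          omega
        · have hc : t.count d = 0 := List.count_eq_zero.mpr hd
          simp [hd, hc]
    · have hmax : max top d = top := by omega
      by_cases h2 : d = top
      · rw [show ulStep (top, u) d = (top, false) by simp [ulStep, h2]]
        rw [ih top false]; simp only [hmax]
        have hle : top ≤ t.foldl max top := (ht top).1
        by_cases h3 : t.foldl max top > top
        · rw [if_pos h3, if_pos h3]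
          have hne : d ≠ t.foldl max top := by omega
          simp [hne]
        · have heq : t.foldl max top = top := by omega
          simp [h2, heq]
      · rw [show ulStep (top, u) d = (top, u) by simp [ulStep, h1, h2]]
        rw [ih top u]; simp only [hmax]
        by_cases h3 : t.foldl max top > top
        · rw [if_pos h3, if_pos h3]
          have hne : d ≠ t.foldl max top := by omega
          simp [hne]
        · by_cases hm : top ∈ t <;> simp [h3, hm, Ne.symm h2]

theorem toDigitsCore_eq (fuel : Nat) : ∀ (m : Nat) (ds : List Char), 0 < m → m < fuel →
    Nat.toDigitsCore 10 fuel m ds = ((Nat.digits 10 m).map Nat.digitChar).reverse ++ ds := by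
  induction fuel with
  | zero => intro m ds hm hf; omega
  | succ fuel ih =>
    intro m ds hm hf
    rw [Nat.toDigitsCore]
    rw [Nat.digits_def' (by norm_num : 1 < 10) hm]
    by_cases h : m / 10 = 0
    · rw [if_pos h]
      have : Nat.digits 10 (m / 10) = [] := by rw [h]; simp
      simp [this]
    · rw [if_neg h]
      rw [ih (m / 10) _ (Nat.pos_of_ne_zero h) (by omega)]
      simp

theorem toDigits_eq (m : Nat) (hm : 0 < m) :
    Nat.toDigits 10 m = ((Nat.digits 10 m).map Nat.digitChar).reverse := by
  rw [Nat.toDigits, toDigitsCore_eq (m + 1) m [] hm (by omega)]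
  simp

theorem digitChar_le_iff (d e : Nat) (hd : d < 10) (he : e < 10) :
    (Nat.digitChar d ≤ Nat.digitChar e) ↔ d ≤ e := by
  interval_cases d <;> interval_cases e <;> decide

theorem foldl_max_mem (l : List Nat) : ∀ (a : Nat), l.foldl max a = a ∨ l.foldl max a ∈ l := by
  induction l with
  | nil => intro a; left; rfl
  | cons d t ih =>
    intro a
    rcases ih (max a d) with h | h
    · simp only [List.foldl_cons, h]
      rcases Nat.le_total a d with h2 | h2
      · right; simp [Nat.max_eq_right h2]
      · left; simp [Nat.max_eq_left h2]
    · right; simp only [List.foldl_cons]; exact List.mem_cons_of_mem _ h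

theorem count_map_digitChar (M : Nat) (hM : M < 10) (ds : List Nat) (h : ∀ d ∈ ds, d < 10) :
    List.count (Nat.digitChar M) (ds.map Nat.digitChar) = List.count M ds := by
  induction ds with
  | nil => simp
  | cons d t ih =>
    have hd : d < 10 := h d (by simp)
    have hiff : (Nat.digitChar d = Nat.digitChar M) ↔ d = M := by
      interval_cases M <;> interval_cases d <;> decide
    simp only [List.map_cons, List.count_cons]
    rw [ih (fun x hx => h x (by simp [hx]))]
    by_cases he : d = M
    · simp [he]
    · simp [he, (by simpa [hiff] using he : ¬ Nat.digitChar d = Nat.digitChar M)]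

-- ===== VERDICT (by name: the statement is the Claim_ definition above) =====
theorem unique_largest_spec : Claim_equal_unique_largest := by
  intro n _hdom hpre
  unfold Spec_unique_largest
  have hpre' : (0:Int) < n := hpre
  set m := n.toNat with hmdef
  have hn : n = (m : Int) := by omega
  have hm : 0 < m := by omega
  set ds := Nat.digits 10 m with hds
  set M := ds.foldl max 0 with hMdef
  have hmax := PySem.List.le_foldl_max ds
  -- digits are nonempty, < 10, and their max M is positive and a member
  have hne : ds ≠ [] := by
    rw [hds]; exact Nat.digits_ne_nil_iff_ne_zero.mpr hm.ne'
  have hlt10 : ∀ d ∈ ds, d < 10 := by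
    intro d hd
    exact Nat.digits_lt_base (by norm_num) (hds ▸ hd)
  have hMpos : 0 < M := by
    have hlast : ds.getLast hne ∈ ds := List.getLast_mem hne
    have hlz : ds.getLast hne ≠ 0 := Nat.getLast_digit_ne_zero 10 hm.ne'
    have := (hmax 0).2 _ hlast
    omega
  have hMmem : M ∈ ds := by
    rcases foldl_max_mem ds 0 with h | h
    · omega
    · exact h
  have hM10 : M < 10 := hlt10 M hMmem
  -- A's side: the loop computes decide (ds.count M = 1)
  have hA : unique_largest n = decide (ds.count M = 1) := by
    rw [unique_largest, hn, show (0:Int) = ((0:Nat):Int) by simp, loop_eq_foldl,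
      foldl_ulStep]
    simp only [← hds, ← hMdef]
    rw [if_pos hMpos]
  -- B's side: the string is the reversed digit characters, its max char is digitChar M
  have hcs : (PySem.Int.toStr n).toList = (ds.map Nat.digitChar).reverse := by
    rw [PySem.Int.toList_toStr, PySem.Int.toChars, if_neg (by omega : ¬ n < 0), hn]
    simp only [Int.toNat_natCast]
    exact toDigits_eq m hm
  have hcsne : (ds.map Nat.digitChar).reverse ≠ [] := by simp [hne]
  rw [hA, unique_largest_alt]
  simp only [hcs]
  rcases hmx : PySem.List.max? (ds.map Nat.digitChar).reverse (fun c => c) with _ | mc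
  · exact absurd ((PySem.List.max?_eq_none_iff _ _).mp hmx) hcsne
  · have hmem : mc ∈ (ds.map Nat.digitChar).reverse := PySem.List.max?_mem hmx
    have hismax := PySem.List.max?_isMax hmx
    obtain ⟨d, hdmem, hdc⟩ : ∃ d ∈ ds, Nat.digitChar d = mc := by
      simpa using hmem
    have hdcM : mc = Nat.digitChar M := by
      have h1 : mc ≤ Nat.digitChar M := by
        rw [← hdc]
        exact (digitChar_le_iff d M (hlt10 d hdmem) hM10).mpr ((hmax 0).2 d hdmem)
      have h2 : Nat.digitChar M ≤ mc := by
        have : Nat.digitChar M ∈ (ds.map Nat.digitChar).reverse := by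
          simp; exact ⟨M, hMmem, rfl⟩
        simpa using hismax _ this
      exact le_antisymm h1 h2
    show decide (List.count M ds = 1)
        = decide (PySem.List.count (ds.map Nat.digitChar).reverse mc = 1)
    rw [PySem.List.count_eq, hdcM, List.count_reverse,
      count_map_digitChar M hM10 ds hlt10]
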